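-- pv_equiv track=rewrite | github.com/terrykim96/TIL | Algorithm/백준/좋은수열_백준_2661.py | good_bad
-- ===== SOURCE A (Python) =====
-- def good_bad(number, depth):        # 좋은 수열인지 나쁜수열인지 파악해주는 함수이다.
--     for i in range(depth):
--         tmp = number[i:]
--         for j in range(1, len(tmp) // 2 + 1):
--             check = tmp[:j]
--             if check == tmp[j: 2*j]:
--                 return False
--     return True
-- ===== SOURCE B (Python) =====
-- def good_bad(number, depth):
--     # For each period j, one right-to-left scan maintains the length of the
--     # current run of positions k with number[k] == number[k+j]; a run of
--     # length >= j starting before depth is exactly an immediate repeat A finds.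
--     n = len(number)
--     bound = min(depth, n)
--     for j in range(1, n // 2 + 1):
--         run = 0
--         for k in range(n - j - 1, -1, -1):
--             run = run + 1 if number[k] == number[k + j] else 0
--             if run >= j and k < bound:
--                 return False
--     return True
-- ===== Notes on version B (the rewrite author's own statement) =====
-- stated objective: faster
-- what changed: A compares slices tmp[:j] == tmp[j:2*j] for every start i < depth and every period j (O(n) per comparison); B instead makes, for each period j, one right-to-left pass maintaining the run length of consecutive positions k with number[k] == number[k+j], reporting a square exactly when a run of length >= j starts before depth, and it never iterates over the dead range n <= i < depth.
import Mathlib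
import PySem

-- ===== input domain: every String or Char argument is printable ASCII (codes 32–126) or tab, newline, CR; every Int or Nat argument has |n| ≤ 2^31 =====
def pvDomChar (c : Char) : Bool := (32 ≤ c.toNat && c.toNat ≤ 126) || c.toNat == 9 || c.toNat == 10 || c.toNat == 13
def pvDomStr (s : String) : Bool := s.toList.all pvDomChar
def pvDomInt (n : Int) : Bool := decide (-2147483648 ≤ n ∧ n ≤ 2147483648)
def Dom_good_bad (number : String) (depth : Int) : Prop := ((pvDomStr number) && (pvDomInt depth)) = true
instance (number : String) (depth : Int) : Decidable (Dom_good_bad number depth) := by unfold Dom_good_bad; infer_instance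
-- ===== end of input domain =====

-- B replaces A's cubic slice-comparison search by a per-period run-length scan
-- (for each period j one pass maintains the run of positions k with s[k]=s[k+j]);
-- objective: faster.

-- ===== PORT A =====
-- inner loop: for j in range(1, len(tmp)//2+1): if tmp[:j] == tmp[j:2*j]: return False
def goAInner (tmp : List Char) : Bool :=
  (PySem.List.pyRange 1 (PySem.Int.floordiv (tmp.length : Int) 2 + 1) 1).any (fun j =>
    decide (PySem.List.slice tmp none (some j) = PySem.List.slice tmp (some j) (some (2 * j))))

-- outer loop: for i in range(depth): tmp = number[i:]; …
def goAOuter (s : List Char) (i stop : Int) : Bool :=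
  if i < stop then
    if goAInner (PySem.List.slice s (some i) none) then false
    else goAOuter s (i + 1) stop
  else true
termination_by (stop - i).toNat
decreasing_by omega

def good_bad (number : String) (depth : Int) : Bool :=
  goAOuter number.toList 0 depth

-- ===== PORT B =====
-- inner loop of Source B: for k in range(n-j-1, -1, -1) with run accumulator
-- (indexing is in range on every visited k, so pyGet? option equality is Python's char equality)
def goBInner (s : List Char) (bound j k run : Int) : Bool :=
  if 0 ≤ k then
    let run' := if PySem.List.pyGet? s k = PySem.List.pyGet? s (k + j) then run + 1 else 0
    if j ≤ run' ∧ k < bound then false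
    else goBInner s bound j (k - 1) run'
  else true
termination_by (k + 1).toNat
decreasing_by omega

-- outer loop of Source B: for j in range(1, n//2+1)
def goBOuter (s : List Char) (n bound j : Int) : Bool :=
  if j < PySem.Int.floordiv n 2 + 1 then
    if goBInner s bound j (n - j - 1) 0 then goBOuter s n bound (j + 1)
    else false
  else true
termination_by (PySem.Int.floordiv n 2 + 1 - j).toNat
decreasing_by omega

def good_bad_alt (number : String) (depth : Int) : Bool :=
  let s := number.toList
  let n : Int := s.length
  let bound := min depth n
  goBOuter s n bound 1

-- ===== PRECONDITION & SPEC =====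
def Spec_good_bad (number : String) (depth : Int) (out : Bool) : Prop := out = good_bad_alt number depth
instance (number : String) (depth : Int) (out : Bool) : Decidable (Spec_good_bad number depth out) := by unfold Spec_good_bad; infer_instance

-- ===== CLAIM (what is proved, stated in full; the proofs are below) =====
def Claim_equal_good_bad : Prop := ∀ (number : String) (depth : Int), Dom_good_bad number depth → Spec_good_bad number depth (good_bad number depth)

-- ===== LEMMAS AND PROOFS =====

-- square of period j at start a (as A's slice comparison sees it)
def SqAt (s : List Char) (a j : Nat) : Prop :=
  (s.drop a).take j = ((s.drop a).drop j).take j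

-- the common specification: some square of period ≥ 1 starts before `depth`
def HasSq (s : List Char) (depth : Int) : Prop :=
  ∃ a j : Nat, (a : Int) < depth ∧ 1 ≤ j ∧ a + 2 * j ≤ s.length ∧ SqAt s a j

-- run of consecutive positions p, p+1, … with s[p] = s[p+j] (B's invariant)
def mrun (s : List Char) (j p : Nat) : Nat :=
  if h : p + j < s.length ∧ s[p]? = s[p + j]? then mrun s j (p + 1) + 1 else 0
termination_by s.length - p
decreasing_by have := h.1; omega

lemma sqAt_iff_pointwise (s : List Char) (a j : Nat) (_h : a + 2 * j ≤ s.length) :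
    SqAt s a j ↔ ∀ m < j, s[a + m]? = s[a + j + m]? := by
  unfold SqAt
  rw [List.drop_drop]
  constructor
  · intro he m hm
    have h2 := congrArg (fun l => l[m]?) he
    simp only [List.getElem?_take_of_lt hm, List.getElem?_drop] at h2
    exact h2
  · intro hp
    apply List.ext_getElem?
    intro m
    by_cases hm : m < j
    · rw [List.getElem?_take_of_lt hm, List.getElem?_take_of_lt hm,
        List.getElem?_drop, List.getElem?_drop]
      exact hp m hm
    · rw [List.getElem?_take_eq_none (by omega), List.getElem?_take_eq_none (by omega)]

lemma mrun_ge_iff (s : List Char) (j p t : Nat) :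
    t ≤ mrun s j p ↔ ∀ m < t, p + m + j < s.length ∧ s[p + m]? = s[p + m + j]? := by
  induction t generalizing p with
  | zero => simp
  | succ t ih =>
    rw [mrun]
    split
    · rename_i h
      constructor
      · intro hle m hm
        match m with
        | 0 =>
          refine ⟨by simpa using h.1, by simpa using h.2⟩
        | Nat.succ m' =>
          have := (ih (p + 1)).mp (by omega) m' (by omega)
          refine ⟨by omega, ?_⟩
          have e1 : p + (m' + 1) = p + 1 + m' := by omega
          rw [e1, this.2]
      · intro hall
        have ht : t ≤ mrun s j (p + 1) := by
          apply (ih (p + 1)).mpr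
          intro m hm
          have := hall (m + 1) (by omega)
          refine ⟨by omega, ?_⟩
          have e1 : p + 1 + m = p + (m + 1) := by omega
          rw [e1, this.2]
        omega
    · rename_i h
      constructor
      · intro hle
        omega
      · intro hall
        exfalso
        have := hall 0 (by omega)
        exact h ⟨by simpa using this.1, by simpa using this.2⟩

lemma mrun_ge_bound (s : List Char) (j p : Nat) (hj : 1 ≤ j) (h : j ≤ mrun s j p) :
    p + 2 * j ≤ s.length := by
  have := (mrun_ge_iff s j p j).mp h (j - 1) (by omega)
  omega

-- j ≤ mrun j p ↔ square of period j at p (for j ≥ 1)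
lemma mrun_ge_iff_sqAt (s : List Char) (j p : Nat) (hj : 1 ≤ j) :
    j ≤ mrun s j p ↔ (p + 2 * j ≤ s.length ∧ SqAt s p j) := by
  constructor
  · intro h
    have hb := mrun_ge_bound s j p hj h
    refine ⟨hb, (sqAt_iff_pointwise s p j hb).mpr ?_⟩
    intro m hm
    have := (mrun_ge_iff s j p j).mp h m hm
    have e1 : p + j + m = p + m + j := by omega
    rw [e1, this.2]
  · rintro ⟨hb, hsq⟩
    apply (mrun_ge_iff s j p j).mpr
    intro m hm
    refine ⟨by omega, ?_⟩
    have := (sqAt_iff_pointwise s p j hb).mp hsq m hm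
    have e1 : p + j + m = p + m + j := by omega
    rw [← e1, this]

lemma goAInner_iff (tmp : List Char) :
    goAInner tmp = true ↔ ∃ j : Nat, 1 ≤ j ∧ 2 * j ≤ tmp.length ∧
      (tmp.take j = (tmp.drop j).take j) := by
  have hfd : PySem.Int.floordiv (tmp.length : Int) 2 = ((tmp.length / 2 : Nat) : Int) := by
    exact_mod_cast PySem.Int.floordiv_natCast tmp.length 2
  unfold goAInner
  rw [List.any_eq_true]
  constructor
  · rintro ⟨jI, hmem, hdec⟩
    rw [PySem.List.mem_pyRange_one, hfd] at hmem
    obtain ⟨h1, h2⟩ := hmem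
    have hji : ((jI.toNat : Int)) = jI := Int.toNat_of_nonneg (by omega)
    refine ⟨jI.toNat, by omega, by omega, ?_⟩
    have hdec' := of_decide_eq_true hdec
    rw [← hji] at hdec'
    have e2 : (2 : Int) * (jI.toNat : Int) = ((2 * jI.toNat : Nat) : Int) := by push_cast; ring
    rw [e2, PySem.List.slice_to_natCast, PySem.List.slice_natCast] at hdec'
    have e3 : 2 * jI.toNat - jI.toNat = jI.toNat := by omega
    rw [e3] at hdec'
    exact hdec'
  · rintro ⟨j, hj1, hj2, heq⟩
    refine ⟨(j : Int), ?_, ?_⟩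
    · rw [PySem.List.mem_pyRange_one, hfd]
      omega
    · apply decide_eq_true
      have e2 : (2 : Int) * (j : Int) = ((2 * j : Nat) : Int) := by push_cast; ring
      rw [e2, PySem.List.slice_to_natCast, PySem.List.slice_natCast]
      have e3 : 2 * j - j = j := by omega
      rw [e3]
      exact heq

lemma goAOuter_iff (s : List Char) (stop : Int) (i : Int) (hi : 0 ≤ i) :
    goAOuter s i stop = true ↔
      ¬ ∃ a j : Nat, i ≤ (a : Int) ∧ (a : Int) < stop ∧ 1 ≤ j ∧
        a + 2 * j ≤ s.length ∧ SqAt s a j := by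
  suffices H : ∀ fuel : Nat, ∀ i : Int, 0 ≤ i → (stop - i).toNat ≤ fuel →
      (goAOuter s i stop = true ↔
        ¬ ∃ a j : Nat, i ≤ (a : Int) ∧ (a : Int) < stop ∧ 1 ≤ j ∧
          a + 2 * j ≤ s.length ∧ SqAt s a j) by
    exact H (stop - i).toNat i hi le_rfl
  intro fuel
  induction fuel with
  | zero =>
    intro i hi hf
    rw [goAOuter, if_neg (by omega)]
    exact iff_of_true rfl (by rintro ⟨a, j, h1, h2, -⟩; omega)
  | succ fuel ih =>
    intro i hi hf
    rw [goAOuter]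
    by_cases hlt : i < stop
    · rw [if_pos hlt, PySem.List.slice_from s hi]
      have hia : ((i.toNat : Int)) = i := Int.toNat_of_nonneg hi
      by_cases hin : goAInner (s.drop i.toNat) = true
      · rw [hin, if_pos rfl]
        obtain ⟨j, hj1, hj2, heq⟩ := (goAInner_iff _).mp hin
        rw [List.length_drop] at hj2
        exact iff_of_false (by simp)
          (fun hne => hne ⟨i.toNat, j, by omega, by omega, hj1, by omega, heq⟩)
      · rw [Bool.not_eq_true] at hin
        rw [hin, if_neg (by simp), ih (i + 1) (by omega) (by omega)]
        apply not_congr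
        constructor
        · rintro ⟨a, j, h1, h2, h3, h4, h5⟩
          exact ⟨a, j, by omega, h2, h3, h4, h5⟩
        · rintro ⟨a, j, h1, h2, h3, h4, h5⟩
          by_cases hae : (a : Int) = i
          · exfalso
            have ha0 : a = i.toNat := by omega
            have : goAInner (s.drop i.toNat) = true := by
              apply (goAInner_iff _).mpr
              refine ⟨j, h3, ?_, ?_⟩
              · rw [List.length_drop]; omega
              · rw [← ha0]; exact h5
            rw [hin] at this
            exact Bool.false_ne_true this
          · exact ⟨a, j, by omega, h2, h3, h4, h5⟩
    · rw [if_neg hlt]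
      exact iff_of_true rfl (by rintro ⟨a, j, h1, h2, -⟩; omega)

lemma good_bad_iff (number : String) (depth : Int) :
    good_bad number depth = true ↔ ¬ HasSq number.toList depth := by
  unfold good_bad HasSq
  rw [goAOuter_iff number.toList depth 0 le_rfl]
  apply not_congr
  constructor
  · rintro ⟨a, j, -, h2, h3, h4, h5⟩
    exact ⟨a, j, h2, h3, h4, h5⟩
  · rintro ⟨a, j, h2, h3, h4, h5⟩
    exact ⟨a, j, by omega, h2, h3, h4, h5⟩

lemma goBInner_iff (s : List Char) (bound : Int) (j : Nat) (_hj : 1 ≤ j) (k : Int)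
    (hk : k < (s.length : Int) - j) :
    goBInner s bound j k (mrun s j (k + 1).toNat) = true ↔
      ¬ ∃ p : Nat, (p : Int) ≤ k ∧ (p : Int) < bound ∧ j ≤ mrun s j p := by
  suffices H : ∀ fuel : Nat, ∀ k : Int, (k + 1).toNat ≤ fuel → k < (s.length : Int) - j →
      (goBInner s bound j k (mrun s j (k + 1).toNat) = true ↔
        ¬ ∃ p : Nat, (p : Int) ≤ k ∧ (p : Int) < bound ∧ j ≤ mrun s j p) by
    exact H (k + 1).toNat k le_rfl hk
  intro fuel
  induction fuel with
  | zero =>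
    intro k hfk hk
    rw [goBInner, if_neg (by omega)]
    exact iff_of_true rfl (by rintro ⟨p, h1, -⟩; omega)
  | succ fuel ih =>
    intro k hfk hk
    by_cases h0 : 0 ≤ k
    · rw [goBInner, if_pos h0]
      dsimp only
      have hkc : ((k.toNat : Int)) = k := Int.toNat_of_nonneg h0
      have hkj : k + (j : Int) = ((k.toNat + j : Nat) : Int) := by omega
      have hltj : k.toNat + j < s.length := by omega
      have hg1 : PySem.List.pyGet? s k = s[k.toNat]? := by
        conv_lhs => rw [← hkc, PySem.List.pyGet?_natCast]
      have hg2 : PySem.List.pyGet? s (k + (j : Int)) = s[k.toNat + j]? := by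
        rw [hkj, PySem.List.pyGet?_natCast]
      have hsucc : (k + 1).toNat = k.toNat + 1 := by omega
      have hrun : (if PySem.List.pyGet? s k = PySem.List.pyGet? s (k + (j : Int))
          then ((mrun s j (k + 1).toNat : Nat) : Int) + 1 else 0)
          = ((mrun s j k.toNat : Nat) : Int) := by
        rw [hg1, hg2]
        by_cases hc : s[k.toNat]? = s[k.toNat + j]?
        · rw [if_pos hc]
          conv_rhs => rw [mrun]
          rw [dif_pos ⟨hltj, hc⟩, hsucc]
          push_cast
          ring
        · rw [if_neg hc]
          conv_rhs => rw [mrun]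
          rw [dif_neg (by rintro ⟨-, hc'⟩; exact hc hc')]
          simp
      rw [hrun]
      by_cases hcond : ((j : Int) ≤ ((mrun s j k.toNat : Nat) : Int) ∧ k < bound)
      · rw [if_pos hcond]
        exact iff_of_false (by simp)
          (fun hne => hne ⟨k.toNat, by omega, by omega, by exact_mod_cast hcond.1⟩)
      · rw [if_neg hcond]
        have hrec : ((k - 1) + 1).toNat = k.toNat := by omega
        have hih := ih (k - 1) (by omega) (by omega)
        rw [hrec] at hih
        rw [hih]
        apply not_congr
        constructor
        · rintro ⟨p, h1, h2, h3⟩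
          exact ⟨p, by omega, h2, h3⟩
        · rintro ⟨p, h1, h2, h3⟩
          by_cases hpe : (p : Int) = k
          · exfalso
            apply hcond
            have hpk : p = k.toNat := by omega
            refine ⟨?_, by omega⟩
            rw [← hpk]
            exact_mod_cast h3
          · exact ⟨p, by omega, h2, h3⟩
    · rw [goBInner, if_neg h0]
      exact iff_of_true rfl (by rintro ⟨p, h1, -⟩; omega)

lemma goBOuter_iff (s : List Char) (bound : Int) (j : Nat) (hj : 1 ≤ j) :
    goBOuter s (s.length : Int) bound (j : Int) = true ↔
      ¬ ∃ j' : Nat, j ≤ j' ∧ 2 * j' ≤ s.length ∧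
        ∃ p : Nat, (p : Int) < bound ∧ j' ≤ mrun s j' p := by
  have hfd : PySem.Int.floordiv (s.length : Int) 2 = ((s.length / 2 : Nat) : Int) := by
    exact_mod_cast PySem.Int.floordiv_natCast s.length 2
  suffices H : ∀ fuel : Nat, ∀ j : Nat, 1 ≤ j → s.length / 2 + 1 - j ≤ fuel →
      (goBOuter s (s.length : Int) bound (j : Int) = true ↔
        ¬ ∃ j' : Nat, j ≤ j' ∧ 2 * j' ≤ s.length ∧
          ∃ p : Nat, (p : Int) < bound ∧ j' ≤ mrun s j' p) by
    exact H _ j hj le_rfl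
  intro fuel
  induction fuel with
  | zero =>
    intro j hj hf
    rw [goBOuter, if_neg (by rw [hfd]; push_cast; omega)]
    exact iff_of_true rfl (by rintro ⟨j', h1, h2, -⟩; omega)
  | succ fuel ih =>
    intro j hj hf
    rw [goBOuter]
    by_cases hcond : (j : Int) < PySem.Int.floordiv (s.length : Int) 2 + 1
    · rw [if_pos hcond]
      have h2j : 2 * j ≤ s.length := by
        rw [hfd] at hcond; push_cast at hcond; omega
      have hmz : mrun s j (s.length - j) = 0 := by
        rw [mrun, dif_neg (by rintro ⟨h1, -⟩; omega)]
      have hk0 : ((s.length : Int) - (j : Int) - 1 + 1).toNat = s.length - j := by omega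
      have hinner := goBInner_iff s bound j hj ((s.length : Int) - (j : Int) - 1) (by omega)
      rw [hk0, hmz, Nat.cast_zero] at hinner
      by_cases hin : goBInner s bound (j : Int) ((s.length : Int) - (j : Int) - 1) 0 = true
      · rw [if_pos hin]
        have hc1 : ((j : Int) + 1) = ((j + 1 : Nat) : Int) := by push_cast; ring
        rw [hc1, ih (j + 1) (by omega) (by omega)]
        have hnosq := hinner.mp hin
        apply not_congr
        constructor
        · rintro ⟨j', h1, h2, p, h3, h4⟩
          exact ⟨j', by omega, h2, p, h3, h4⟩
        · rintro ⟨j', h1, h2, p, h3, h4⟩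
          by_cases hje : j' = j
          · exfalso
            subst hje
            apply hnosq
            refine ⟨p, ?_, h3, h4⟩
            have hb := mrun_ge_bound s j' p (by omega) h4
            omega
          · exact ⟨j', by omega, h2, p, h3, h4⟩
      · rw [if_neg hin]
        refine iff_of_false (by simp) ?_
        intro hne
        have hp : ∃ p : Nat, (p : Int) ≤ (s.length : Int) - (j : Int) - 1 ∧
            (p : Int) < bound ∧ j ≤ mrun s j p := by
          by_contra hno
          exact hin (hinner.mpr hno)
        obtain ⟨p, hp1, hp2, hp3⟩ := hp
        exact hne ⟨j, le_rfl, h2j, p, hp2, hp3⟩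
    · rw [if_neg hcond]
      rw [hfd] at hcond
      push_cast at hcond
      exact iff_of_true rfl (by rintro ⟨j', h1, h2, -⟩; omega)

lemma good_bad_alt_iff (number : String) (depth : Int) :
    good_bad_alt number depth = true ↔ ¬ HasSq number.toList depth := by
  simp only [good_bad_alt]
  have h1 := goBOuter_iff number.toList (min depth (number.toList.length : Int)) 1 le_rfl
  rw [Nat.cast_one] at h1
  rw [h1]
  unfold HasSq
  apply not_congr
  constructor
  · rintro ⟨j', hj1, hj2, p, h3, h4⟩
    have hm := (mrun_ge_iff_sqAt _ j' p hj1).mp h4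
    exact ⟨p, j', by omega, hj1, hm.1, hm.2⟩
  · rintro ⟨a, j, h1, h2, h3, h4⟩
    exact ⟨j, h2, by omega, a, by omega,
      (mrun_ge_iff_sqAt _ j a h2).mpr ⟨h3, h4⟩⟩

-- ===== VERDICT (by name: the statement is the Claim_ definition above) =====
theorem good_bad_spec : Claim_equal_good_bad := by
  intro number depth _
  unfold Spec_good_bad
  have hA := good_bad_iff number depth
  have hB := good_bad_alt_iff number depth
  cases hA' : good_bad number depth <;> cases hB' : good_bad_alt number depth <;>
    simp_all
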